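-- pv_equiv track=rewrite | github.com/NIC-SBI/CC_protein_origami | ppmod/topology.py | allr
-- ===== SOURCE A (Python) =====
-- def allr(arot):
--     if len(arot) == 0:
--         return [[]]
--     (x,rts) = arot[0]
--     dics = allr(arot[1:])
--     res = []
--     for di in dics:
--         for r in rts:
--             tmp = [(x,r)]+di
--             res.append(tmp[:])
--     return res
-- ===== SOURCE B (Python) =====
-- def allr(arot):
--     res = [[]]
--     for (x, rts) in reversed(arot):
--         res = [[(x, r)] + di for di in res for r in rts]
--     return res
-- ===== Notes on version B (the rewrite author's own statement) =====
-- stated objective: alternative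
-- what changed: Replaced the tail recursion with an explicit iterative fold over the reversed input that maintains the running list of partial combinations in an accumulator.
import Mathlib
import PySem

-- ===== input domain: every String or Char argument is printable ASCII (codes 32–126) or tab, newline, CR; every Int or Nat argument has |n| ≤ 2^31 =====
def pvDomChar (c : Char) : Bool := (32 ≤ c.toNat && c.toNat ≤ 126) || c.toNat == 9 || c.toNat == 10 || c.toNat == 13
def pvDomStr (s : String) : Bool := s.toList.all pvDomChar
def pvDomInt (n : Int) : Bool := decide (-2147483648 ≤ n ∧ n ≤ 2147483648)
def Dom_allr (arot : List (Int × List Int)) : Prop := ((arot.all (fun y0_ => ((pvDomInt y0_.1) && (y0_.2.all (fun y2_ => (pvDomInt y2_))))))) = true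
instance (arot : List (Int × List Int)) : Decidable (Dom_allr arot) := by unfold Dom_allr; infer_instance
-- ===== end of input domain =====

-- B replaces A's recursion on the tail by an iterative fold over the reversed input (alternative decomposition, same cost).

-- ===== PORT A =====
-- literal port of A: recursion on the first element, nested append loops
def allr (arot : List (Int × List Int)) : List (List (Int × Int)) :=
  match arot with
  | [] => [[]]
  | (x, rts) :: rest =>
      let dics := allr rest
      dics.foldl (fun res di =>
        rts.foldl (fun res r => res ++ [(x, r) :: di]) res) []

-- ===== PORT B =====
-- port of B: fold over reversed input, accumulator of partial combinations
def allr_alt (arot : List (Int × List Int)) : List (List (Int × Int)) :=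
  arot.reverse.foldl
    (fun res p => res.flatMap (fun di => p.2.map (fun r => (p.1, r) :: di)))
    [[]]

-- ===== PRECONDITION & SPEC =====
def Spec_allr (arot : List (Int × List Int)) (out : List (List (Int × Int))) : Prop := out = allr_alt arot
instance (arot : List (Int × List Int)) (out : List (List (Int × Int))) : Decidable (Spec_allr arot out) := by unfold Spec_allr; infer_instance

-- ===== CLAIM (what is proved, stated in full; the proofs are below) =====
def Claim_equal_allr : Prop := ∀ (arot : List (Int × List Int)), Dom_allr arot → Spec_allr arot (allr arot)

-- ===== LEMMAS AND PROOFS =====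

theorem allr_inner_foldl (x : Int) (rts : List Int) (di : List (Int × Int))
    (res : List (List (Int × Int))) :
    rts.foldl (fun res r => res ++ [(x, r) :: di]) res
      = res ++ rts.map (fun r => (x, r) :: di) := by
  induction rts generalizing res with
  | nil => simp
  | cons r rs ih => simp [List.foldl, ih]

theorem allr_outer_foldl (x : Int) (rts : List Int)
    (dics acc : List (List (Int × Int))) :
    dics.foldl (fun res di =>
        rts.foldl (fun res r => res ++ [(x, r) :: di]) res) acc
      = acc ++ dics.flatMap (fun di => rts.map (fun r => (x, r) :: di)) := by
  induction dics generalizing acc with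
  | nil => simp
  | cons d ds ih =>
      simp only [List.foldl_cons]
      rw [allr_inner_foldl, ih, List.flatMap_cons, List.append_assoc]

theorem allr_eq_foldr (arot : List (Int × List Int)) :
    allr arot
      = arot.foldr
          (fun p res => res.flatMap (fun di => p.2.map (fun r => (p.1, r) :: di)))
          [[]] := by
  induction arot with
  | nil => rfl
  | cons p rest ih =>
      obtain ⟨x, rts⟩ := p
      simp only [allr, List.foldr_cons]
      rw [allr_outer_foldl, ih, List.nil_append]

-- ===== VERDICT (by name: the statement is the Claim_ definition above) =====
theorem allr_spec : Claim_equal_allr := by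
  intro arot _
  show allr arot = allr_alt arot
  rw [allr_eq_foldr, allr_alt, List.foldl_reverse]
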